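-- pv_equiv track=rewrite | github.com/kev-cam/ldx | python/c2v_test.py | gen_test_main
-- ===== SOURCE A (Python) =====
-- def gen_test_main(module_name, params, ret_width):
--     """Generate a test program that calls both C original and Verilator model."""
--
--     def c_type(width, signed):
--         if width <= 8: return "uint8_t" if not signed else "int8_t"
--         if width <= 16: return "uint16_t" if not signed else "int16_t"
--         if width <= 32: return "uint32_t" if not signed else "int32_t"
--         return "uint64_t" if not signed else "int64_t"
--
--     ret_ctype = c_type(ret_width, True)
--     param_decls = ", ".join(f"{c_type(w, s)} {n}" for n, w, s in params)
--     param_names = ", ".join(n for n, _, _ in params)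
--
--     # Generate test values based on width
--     def test_vals(width):
--         if width <= 8: return ["0", "1", "127", "255"]
--         if width <= 16: return ["0", "1", "1000", "65535"]
--         if width <= 32: return ["0", "1", "42", "1000000", "0xDEADBEEF"]
--         return ["0", "1", "42", "0xDEADBEEFCAFE", "0x5555555555555555"]
--
--     lines = []
--     lines.append('#include <cstdio>')
--     lines.append('#include <cstdint>')
--     lines.append('#include <cstdlib>')
--     lines.append('')
--     lines.append(f'// Original C function (linked from source)')
--     lines.append(f'extern "C" {ret_ctype} {module_name}({param_decls});')
--     lines.append(f'// Verilator model')
--     lines.append(f'extern "C" {ret_ctype} {module_name}_hw({param_decls});')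
--     lines.append('')
--     lines.append('int main() {')
--     lines.append(f'    int pass = 0, fail = 0;')
--     lines.append(f'    printf("Testing {module_name}: C vs Verilator\\n");')
--     lines.append('')
--
--     # Generate test vectors
--     vals = test_vals(params[0][1]) if params else ["0"]
--
--     # Generate test vectors: pick fewer values per param to keep test count manageable
--     n = len(params)
--     per_param = max(2, 5 - n)  # fewer values with more params
--     test_vals_per = [test_vals(params[i][1])[:per_param] for i in range(n)]
--
--     # Recursive cartesian product of test values
--     def gen_combos(idx, combo):
--         if idx == n:
--             # Emit one test case
--             var_names = [f"p{i}" for i in range(n)]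
--             decls = "; ".join(
--                 f"auto {var_names[i]} = ({c_type(params[i][1], params[i][2])}){combo[i]}"
--                 for i in range(n)
--             )
--             call_args = ", ".join(var_names)
--             lines.append(f'    {{ {decls};')
--             lines.append(f'      auto c = {module_name}({call_args});')
--             lines.append(f'      auto v = {module_name}_hw({call_args});')
--             lines.append(f'      if (c == v) {{ pass++; }} else {{ fail++; printf("  FAIL: C=%lld V=%lld\\n", (long long)c, (long long)v); }}')
--             lines.append(f'    }}')
--             return
--         for val in test_vals_per[idx]:
--             gen_combos(idx + 1, combo + [val])
--
--     if n == 0: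
--         lines.append(f'    {{ auto c = {module_name}(); auto v = {module_name}_hw();')
--         lines.append(f'      if (c == v) pass++; else fail++; }}')
--     else:
--         gen_combos(0, [])
--
--     lines.append('')
--     lines.append(f'    printf("{module_name}: %d passed, %d failed\\n", pass, fail);')
--     lines.append(f'    return fail ? 1 : 0;')
--     lines.append('}')
--
--     return "\n".join(lines)
-- ===== SOURCE B (Python) =====
-- import itertools
--
-- def gen_test_main(module_name, params, ret_width):
--     """Generate a test program that calls both C original and Verilator model."""
--
--     def c_type(width, signed):
--         if width <= 8: return "int8_t" if signed else "uint8_t"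
--         if width <= 16: return "int16_t" if signed else "uint16_t"
--         if width <= 32: return "int32_t" if signed else "uint32_t"
--         return "int64_t" if signed else "uint64_t"
--
--     def test_vals(width):
--         if width <= 8: return ["0", "1", "127", "255"]
--         if width <= 16: return ["0", "1", "1000", "65535"]
--         if width <= 32: return ["0", "1", "42", "1000000", "0xDEADBEEF"]
--         return ["0", "1", "42", "0xDEADBEEFCAFE", "0x5555555555555555"]
--
--     ret_ctype = c_type(ret_width, True)
--     param_decls = ", ".join(f"{c_type(w, s)} {n}" for n, w, s in params)
--
--     header = [
--         '#include <cstdio>',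
--         '#include <cstdint>',
--         '#include <cstdlib>',
--         '',
--         '// Original C function (linked from source)',
--         f'extern "C" {ret_ctype} {module_name}({param_decls});',
--         '// Verilator model',
--         f'extern "C" {ret_ctype} {module_name}_hw({param_decls});',
--         '',
--         'int main() {',
--         '    int pass = 0, fail = 0;',
--         f'    printf("Testing {module_name}: C vs Verilator\\n");',
--         '',
--     ]
--
--     n = len(params)
--     per_param = max(2, 5 - n)
--
--     body = []
--     if n == 0:
--         body = [
--             f'    {{ auto c = {module_name}(); auto v = {module_name}_hw();',
--             '      if (c == v) pass++; else fail++; }',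
--         ]
--     else:
--         value_lists = [test_vals(w)[:per_param] for _, w, _ in params]
--         call_args = ", ".join(f"p{i}" for i in range(n))
--         for combo in itertools.product(*value_lists):
--             decls = "; ".join(
--                 f"auto p{i} = ({c_type(w, s)}){v}"
--                 for i, ((_, w, s), v) in enumerate(zip(params, combo))
--             )
--             body += [
--                 f'    {{ {decls};',
--                 f'      auto c = {module_name}({call_args});',
--                 f'      auto v = {module_name}_hw({call_args});',
--                 f'      if (c == v) {{ pass++; }} else {{ fail++; printf("  FAIL: C=%lld V=%lld\\n", (long long)c, (long long)v); }}',
--                 '    }',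
--             ]
--
--     footer = [
--         '',
--         f'    printf("{module_name}: %d passed, %d failed\\n", pass, fail);',
--         '    return fail ? 1 : 0;',
--         '}',
--     ]
--     return "\n".join(header + body + footer)
-- ===== Notes on version B (the rewrite author's own statement) =====
-- stated objective: idiomatic
-- what changed: Replaces A's recursive gen_combos closure (which mutates a shared lines list) with an iterative itertools.product over per-parameter value lists, emitting each test block via zip/enumerate instead of index arithmetic, and assembles the output from header/body/footer blocks.
import Mathlib
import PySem

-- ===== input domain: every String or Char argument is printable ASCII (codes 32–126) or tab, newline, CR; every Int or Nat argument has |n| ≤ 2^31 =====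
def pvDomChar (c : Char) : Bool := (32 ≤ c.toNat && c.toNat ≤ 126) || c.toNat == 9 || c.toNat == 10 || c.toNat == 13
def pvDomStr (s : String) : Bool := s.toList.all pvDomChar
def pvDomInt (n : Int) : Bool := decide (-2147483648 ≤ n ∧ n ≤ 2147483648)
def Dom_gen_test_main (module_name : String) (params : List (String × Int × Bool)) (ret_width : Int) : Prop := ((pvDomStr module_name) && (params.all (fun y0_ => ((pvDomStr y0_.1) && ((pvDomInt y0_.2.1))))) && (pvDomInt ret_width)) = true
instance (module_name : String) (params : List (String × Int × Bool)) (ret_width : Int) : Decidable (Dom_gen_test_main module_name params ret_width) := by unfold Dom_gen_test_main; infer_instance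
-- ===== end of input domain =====

-- B replaces A's recursive gen_combos closure by an iterative cartesian product
-- (itertools.product) over per-parameter value lists, building the output from
-- header/body/footer blocks; same emitted string (objective: idiomatic).

-- Helpers shared verbatim by both Pythons (nested defs `c_type` / `test_vals`)
def pvCType (width : Int) (signed : Bool) : String :=
  if width ≤ 8 then (if signed then "int8_t" else "uint8_t")
  else if width ≤ 16 then (if signed then "int16_t" else "uint16_t")
  else if width ≤ 32 then (if signed then "int32_t" else "uint32_t")
  else (if signed then "int64_t" else "uint64_t")

def pvTestVals (width : Int) : List String :=
  if width ≤ 8 then ["0", "1", "127", "255"]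
  else if width ≤ 16 then ["0", "1", "1000", "65535"]
  else if width ≤ 32 then ["0", "1", "42", "1000000", "0xDEADBEEF"]
  else ["0", "1", "42", "0xDEADBEEFCAFE", "0x5555555555555555"]

-- The thirteen header lines and four footer lines (identical text in A and B)
def pvHeaderLines (module_name ret_ctype param_decls : String) : List String :=
  [ "#include <cstdio>",
    "#include <cstdint>",
    "#include <cstdlib>",
    "",
    "// Original C function (linked from source)",
    "extern \"C\" " ++ ret_ctype ++ " " ++ module_name ++ "(" ++ param_decls ++ ");",
    "// Verilator model",
    "extern \"C\" " ++ ret_ctype ++ " " ++ module_name ++ "_hw(" ++ param_decls ++ ");",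
    "",
    "int main() {",
    "    int pass = 0, fail = 0;",
    "    printf(\"Testing " ++ module_name ++ ": C vs Verilator\\n\");",
    "" ]

def pvFooterLines (module_name : String) : List String :=
  [ "",
    "    printf(\"" ++ module_name ++ ": %d passed, %d failed\\n\", pass, fail);",
    "    return fail ? 1 : 0;",
    "}" ]

def pvZeroParamBody (module_name : String) : List String :=
  [ "    { auto c = " ++ module_name ++ "(); auto v = " ++ module_name ++ "_hw();",
    "      if (c == v) pass++; else fail++; }" ]

-- ===== PORT A =====
-- the five lines A's gen_combos appends at idx == n (indexing via range(n))
def pvEmitA (module_name : String) (params : List (String × Int × Bool)) (n : Nat)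
    (combo : List String) : List String :=
  let var_names := (List.range n).map (fun i => "p" ++ PySem.Int.toStr (Int.ofNat i))
  let decls := PySem.Str.join "; " ((List.range n).map (fun i =>
    let p := params.getD i ("", 0, false)
    "auto " ++ var_names.getD i "" ++ " = (" ++ pvCType p.2.1 p.2.2 ++ ")" ++ combo.getD i ""))
  let call_args := PySem.Str.join ", " var_names
  [ "    { " ++ decls ++ ";",
    "      auto c = " ++ module_name ++ "(" ++ call_args ++ ");",
    "      auto v = " ++ module_name ++ "_hw(" ++ call_args ++ ");",
    "      if (c == v) { pass++; } else { fail++; printf(\"  FAIL: C=%lld V=%lld\\n\", (long long)c, (long long)v); }",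
    "    }" ]

-- A's recursive gen_combos(idx, combo): `rest` is test_vals_per[idx:]
def pvGenCombosA (module_name : String) (params : List (String × Int × Bool)) (n : Nat) :
    List (List String) → List String → List String
  | [], combo => pvEmitA module_name params n combo
  | vs :: rest, combo => vs.flatMap (fun v => pvGenCombosA module_name params n rest (combo ++ [v]))

def gen_test_main (module_name : String) (params : List (String × Int × Bool)) (ret_width : Int) : String :=
  let ret_ctype := pvCType ret_width true
  let param_decls := PySem.Str.join ", " (params.map (fun p => pvCType p.2.1 p.2.2 ++ " " ++ p.1))
  let _param_names := PySem.Str.join ", " (params.map (fun p => p.1))  -- computed and unused, as in A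
  let lines := pvHeaderLines module_name ret_ctype param_decls
  let _vals := match params with  -- computed and unused, as in A
    | [] => ["0"]
    | p :: _ => pvTestVals p.2.1
  let n := params.length
  let per_param : Int := max 2 (5 - (n : Int))
  let test_vals_per := (List.range n).map (fun i =>
    (pvTestVals (params.getD i ("", 0, false)).2.1).take per_param.toNat)  -- [:per_param], per_param ≥ 2
  let body := if n = 0 then pvZeroParamBody module_name
              else pvGenCombosA module_name params n test_vals_per []
  PySem.Str.join "\n" (lines ++ body ++ pvFooterLines module_name)

-- ===== PORT B =====
-- B's per-combo block: enumerate(zip(params, combo)) for the decls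
def pvEmitB (module_name call_args : String) (params : List (String × Int × Bool))
    (combo : List String) : List String :=
  let decls := PySem.Str.join "; " ((PySem.List.enumerate (params.zip combo) 0).map (fun t =>
    "auto p" ++ PySem.Int.toStr t.1 ++ " = (" ++ pvCType t.2.1.2.1 t.2.1.2.2 ++ ")" ++ t.2.2))
  [ "    { " ++ decls ++ ";",
    "      auto c = " ++ module_name ++ "(" ++ call_args ++ ");",
    "      auto v = " ++ module_name ++ "_hw(" ++ call_args ++ ");",
    "      if (c == v) { pass++; } else { fail++; printf(\"  FAIL: C=%lld V=%lld\\n\", (long long)c, (long long)v); }",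
    "    }" ]

-- itertools.product(*lists): first list varies slowest
def pvProduct : List (List String) → List (List String)
  | [] => [[]]
  | vs :: rest => vs.flatMap (fun v => (pvProduct rest).map (fun c => v :: c))

def gen_test_main_alt (module_name : String) (params : List (String × Int × Bool)) (ret_width : Int) : String :=
  let ret_ctype := pvCType ret_width true
  let param_decls := PySem.Str.join ", " (params.map (fun p => pvCType p.2.1 p.2.2 ++ " " ++ p.1))
  let header := pvHeaderLines module_name ret_ctype param_decls
  let n := params.length
  let per_param : Int := max 2 (5 - (n : Int))
  let body :=
    if n = 0 then pvZeroParamBody module_name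
    else
      let value_lists := params.map (fun p => (pvTestVals p.2.1).take per_param.toNat)
      let call_args := PySem.Str.join ", " ((List.range n).map (fun i => "p" ++ PySem.Int.toStr (Int.ofNat i)))
      (pvProduct value_lists).flatMap (pvEmitB module_name call_args params)
  PySem.Str.join "\n" (header ++ body ++ pvFooterLines module_name)

-- ===== PRECONDITION & SPEC =====
def Spec_gen_test_main (module_name : String) (params : List (String × Int × Bool)) (ret_width : Int) (out : String) : Prop := out = gen_test_main_alt module_name params ret_width
instance (module_name : String) (params : List (String × Int × Bool)) (ret_width : Int) (out : String) : Decidable (Spec_gen_test_main module_name params ret_width out) := by unfold Spec_gen_test_main; infer_instance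

-- ===== CLAIM (what is proved, stated in full; the proofs are below) =====
def Claim_equal_gen_test_main : Prop := ∀ (module_name : String) (params : List (String × Int × Bool)) (ret_width : Int), Dom_gen_test_main module_name params ret_width → Spec_gen_test_main module_name params ret_width (gen_test_main module_name params ret_width)

-- ===== LEMMAS AND PROOFS =====

theorem pv_flatMap_congr {α β : Type} (xs : List α) (f g : α → List β)
    (h : ∀ x ∈ xs, f x = g x) : xs.flatMap f = xs.flatMap g := by
  induction xs with
  | nil => rfl
  | cons a t ih =>
    simp only [List.flatMap_cons]
    rw [h a (by simp), ih (fun x hx => h x (by simp [hx]))]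

theorem pv_range_map_getD {α β : Type} (xs : List α) (d : α) (f : α → β) :
    (List.range xs.length).map (fun i => f (xs.getD i d)) = xs.map f := by
  induction xs with
  | nil => rfl
  | cons a t ih =>
    simp only [List.length_cons, List.range_succ_eq_map, List.map_cons, List.map_map]
    refine congrArg (f a :: ·) ?_
    rw [← ih]
    exact List.map_congr_left (fun i _ => by simp [List.getD])

theorem pv_getD_map_range {β : Type} (n i : Nat) (f : Nat → β) (d : β) (hi : i < n) :
    ((List.range n).map f).getD i d = f i := by
  simp [List.getD, hi]

theorem pv_mem_product_length (ls : List (List String)) (c : List String)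
    (hc : c ∈ pvProduct ls) : c.length = ls.length := by
  induction ls generalizing c with
  | nil => simp [pvProduct] at hc; simp [hc]
  | cons vs rest ih =>
    simp only [pvProduct, List.mem_flatMap, List.mem_map] at hc
    obtain ⟨v, _, c', hc', rfl⟩ := hc
    simp [ih c' hc']

theorem pv_genA_eq_product (m : String) (ps : List (String × Int × Bool)) (n : Nat)
    (rest : List (List String)) (combo : List String) :
    pvGenCombosA m ps n rest combo
      = (pvProduct rest).flatMap (fun c => pvEmitA m ps n (combo ++ c)) := by
  induction rest generalizing combo with
  | nil => simp [pvGenCombosA, pvProduct]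
  | cons vs rest ih =>
    simp only [pvGenCombosA, pvProduct, List.flatMap_assoc]
    exact pv_flatMap_congr _ _ _ (fun v _ => by simp [ih, List.flatMap_map])

theorem pv_range_map_enum {α β γ : Type} (ps : List α) (cs : List β) (d : α) (e : β)
    (g : Int → α → β → γ) (s : Int) (h : cs.length = ps.length) :
    (List.range ps.length).map (fun i => g (s + Int.ofNat i) (ps.getD i d) (cs.getD i e))
      = (PySem.List.enumerate (ps.zip cs) s).map (fun t => g t.1 t.2.1 t.2.2) := by
  induction ps generalizing cs s with
  | nil => simp at h; simp [h, PySem.List.enumerate_nil]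
  | cons p ps ih =>
    cases cs with
    | nil => simp at h
    | cons c cs =>
      simp at h
      simp only [List.length_cons, List.range_succ_eq_map, List.map_cons, List.map_map,
        List.zip_cons_cons, PySem.List.enumerate_cons]
      refine congrArg₂ (· :: ·) (by simp) ?_
      rw [← ih cs (s + 1) h]
      exact List.map_congr_left (fun i _ => by
        simp [Function.comp, List.getD]
        ring_nf)

theorem pv_emitA_eq_emitB (m : String) (ps : List (String × Int × Bool)) (c : List String)
    (hc : c.length = ps.length) :
    pvEmitA m ps ps.length c
      = pvEmitB m (PySem.Str.join ", " ((List.range ps.length).map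
          (fun i => "p" ++ PySem.Int.toStr (Int.ofNat i)))) ps c := by
  simp only [pvEmitA, pvEmitB]
  refine congrArg₂ (fun (d ca : String) =>
    [ "    { " ++ d ++ ";",
      "      auto c = " ++ m ++ "(" ++ ca ++ ");",
      "      auto v = " ++ m ++ "_hw(" ++ ca ++ ");",
      "      if (c == v) { pass++; } else { fail++; printf(\"  FAIL: C=%lld V=%lld\\n\", (long long)c, (long long)v); }",
      "    }" ]) ?_ rfl
  refine congrArg (PySem.Str.join "; ") ?_
  have step1 : (List.range ps.length).map (fun i =>
        let p := ps.getD i ("", 0, false)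
        "auto " ++ (((List.range ps.length).map
            (fun j => "p" ++ PySem.Int.toStr (Int.ofNat j))).getD i "")
          ++ " = (" ++ pvCType p.2.1 p.2.2 ++ ")" ++ c.getD i "")
      = (List.range ps.length).map (fun i =>
        "auto p" ++ PySem.Int.toStr ((0 : Int) + Int.ofNat i)
          ++ " = (" ++ pvCType (ps.getD i ("", 0, false)).2.1 (ps.getD i ("", 0, false)).2.2
          ++ ")" ++ c.getD i "") :=
    List.map_congr_left (fun i hi => by
      rw [pv_getD_map_range ps.length i _ "" (List.mem_range.mp hi)]
      simp only [zero_add]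
      rfl)
  rw [step1]
  exact pv_range_map_enum ps c ("", 0, false) "" (fun i p v =>
    "auto p" ++ PySem.Int.toStr i ++ " = (" ++ pvCType p.2.1 p.2.2 ++ ")" ++ v) 0 hc

-- ===== VERDICT (by name: the statement is the Claim_ definition above) =====
theorem gen_test_main_spec : Claim_equal_gen_test_main := by
  intro m ps rw _
  unfold Spec_gen_test_main gen_test_main gen_test_main_alt
  simp only []
  refine congrArg (PySem.Str.join "\n") ?_
  refine congrArg₂ (fun (b f : List String) =>
    pvHeaderLines m (pvCType rw true)
      (PySem.Str.join ", " (ps.map (fun p => pvCType p.2.1 p.2.2 ++ " " ++ p.1))) ++ b ++ f) ?_ rfl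
  by_cases hn : ps.length = 0
  · simp [hn]
  · simp only [if_neg hn]
    rw [pv_genA_eq_product]
    have hvl : (List.range ps.length).map (fun i =>
          (pvTestVals (ps.getD i ("", 0, false)).2.1).take (max 2 (5 - (ps.length : Int))).toNat)
        = ps.map (fun p => (pvTestVals p.2.1).take (max 2 (5 - (ps.length : Int))).toNat) :=
      pv_range_map_getD ps ("", 0, false)
        (fun p => (pvTestVals p.2.1).take (max 2 (5 - (ps.length : Int))).toNat)
    rw [hvl]
    refine pv_flatMap_congr _ _ _ (fun c hc => ?_)
    have hlen : c.length = ps.length := by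
      have := pv_mem_product_length _ c hc
      simpa using this
    simpa using pv_emitA_eq_emitB m ps c hlen
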